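-- pv_equiv track=rewrite | github.com/xenakal/Simulation_Interactions | src/my_utils/string_operations.py | find_first_char
-- ===== SOURCE A (Python) =====
-- def find_first_char(s, char_list):
--     min_index = len(s)
--     for elem in char_list:
--         if s.find(elem) != -1:
--             min_index = min(min_index,s.find(elem))
--
--     if min_index == len(s):
--         return ""
--     return s[min_index]
-- ===== SOURCE B (Python) =====
-- def find_first_char(s, char_list):
--     for i in range(len(s)):
--         if any(s.startswith(elem, i) for elem in char_list):
--             return s[i]
--     return ""
-- ===== Notes on version B (the rewrite author's own statement) =====
-- stated objective: faster
-- what changed: Inverted the control flow: instead of computing s.find(elem) for every element (twice each) and taking the minimum index, B scans positions of s left to right once and returns s[i] at the first position where some element matches via startswith, stopping early.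
import Mathlib
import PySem

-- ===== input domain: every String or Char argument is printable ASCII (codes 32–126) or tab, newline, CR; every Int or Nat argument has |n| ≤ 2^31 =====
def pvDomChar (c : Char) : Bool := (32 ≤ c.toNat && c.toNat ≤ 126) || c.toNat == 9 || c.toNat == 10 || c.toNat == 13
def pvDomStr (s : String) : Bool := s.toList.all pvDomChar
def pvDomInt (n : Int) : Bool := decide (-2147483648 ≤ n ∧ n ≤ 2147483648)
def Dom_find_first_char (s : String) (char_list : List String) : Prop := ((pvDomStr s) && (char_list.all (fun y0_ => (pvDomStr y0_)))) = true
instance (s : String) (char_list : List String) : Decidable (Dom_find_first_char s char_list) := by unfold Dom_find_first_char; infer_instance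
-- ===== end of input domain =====

-- B inverts A's control flow: instead of one find per element (minimised), B scans
-- positions of s left to right and returns at the first position where any element
-- matches (measured faster: B stops at the first match, A scans all of s per element).

-- ===== PORT A =====
-- A: min_index = len(s); for elem: if s.find(elem) != -1: min_index = min(min_index, s.find(elem));
--    then "" if min_index == len(s) else s[min_index].
def find_first_char (s : String) (char_list : List String) : String :=
  let min_index : Int :=
    char_list.foldl
      (fun m elem =>
        if PySem.Chars.find s.toList elem.toList ≠ -1 then
          min m (PySem.Chars.find s.toList elem.toList)
        else m)
      (s.toList.length : Int)
  if min_index = (s.toList.length : Int) then ""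
  else
    match PySem.List.pyGet? s.toList min_index with
    | some c => String.ofList [c]
    | none => ""   -- unreachable: min_index is then a find result, in range

-- ===== PORT B =====
-- B: for i in range(len(s)): if any(s.startswith(elem, i) ...): return s[i]; return "".
-- s.startswith(elem, i) for 0 ≤ i ≤ len(s) is exactly Chars.startswith on (toList.drop i).
def find_first_char_alt (s : String) (char_list : List String) : String :=
  match (List.range s.toList.length).find?
      (fun i => char_list.any (fun elem => PySem.Chars.startswith (s.toList.drop i) elem.toList)) with
  | some i =>
      match PySem.List.pyGet? s.toList (i : Int) with
      | some c => String.ofList [c]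
      | none => ""   -- unreachable: i < len(s)
  | none => ""

-- ===== PRECONDITION & SPEC =====
def Spec_find_first_char (s : String) (char_list : List String) (out : String) : Prop := out = find_first_char_alt s char_list
instance (s : String) (char_list : List String) (out : String) : Decidable (Spec_find_first_char s char_list out) := by unfold Spec_find_first_char; infer_instance

-- ===== CLAIM (what is proved, stated in full; the proofs are below) =====
def Claim_equal_find_first_char : Prop := ∀ (s : String) (char_list : List String), Dom_find_first_char s char_list → Spec_find_first_char s char_list (find_first_char s char_list)

-- ===== LEMMAS AND PROOFS =====

-- A's fold step, abstracted over the string's characters.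
def ffcStep (cs : List Char) : Int → String → Int :=
  fun m elem =>
    if PySem.Chars.find cs elem.toList ≠ -1 then
      min m (PySem.Chars.find cs elem.toList)
    else m

theorem ffc_fold_le_init (cs : List Char) (L : List String) :
    ∀ m0 : Int, L.foldl (ffcStep cs) m0 ≤ m0 := by
  induction L with
  | nil => intro m0; simp
  | cons e L ih =>
    intro m0
    have h := ih (ffcStep cs m0 e)
    refine le_trans (by simpa using h) ?_
    unfold ffcStep
    split
    · exact min_le_left _ _
    · exact le_refl _

theorem ffc_fold_le_find (cs : List Char) (L : List String) :
    ∀ m0 : Int, ∀ e ∈ L, PySem.Chars.find cs e.toList ≠ -1 →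
      L.foldl (ffcStep cs) m0 ≤ PySem.Chars.find cs e.toList := by
  induction L with
  | nil => intro _ e he; simp at he
  | cons a L ih =>
    intro m0 e he hne
    rcases List.mem_cons.mp he with rfl | he'
    · refine le_trans (ffc_fold_le_init cs L _) ?_
      unfold ffcStep
      rw [if_pos hne]
      exact min_le_right _ _
    · exact ih _ e he' hne

theorem ffc_fold_cases (cs : List Char) (L : List String) :
    ∀ m0 : Int, L.foldl (ffcStep cs) m0 = m0 ∨
      ∃ e ∈ L, PySem.Chars.find cs e.toList ≠ -1 ∧
        L.foldl (ffcStep cs) m0 = PySem.Chars.find cs e.toList := by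
  induction L with
  | nil => intro m0; left; rfl
  | cons a L ih =>
    intro m0
    rcases ih (ffcStep cs m0 a) with h | ⟨e, he, hne, heq⟩
    · by_cases hna : PySem.Chars.find cs a.toList ≠ -1
      · have hstep : ffcStep cs m0 a = min m0 (PySem.Chars.find cs a.toList) := by
          unfold ffcStep; rw [if_pos hna]
        rcases min_cases m0 (PySem.Chars.find cs a.toList) with ⟨hmin, _⟩ | ⟨hmin, _⟩
        · left; simpa [hstep, hmin] using h
        · right
          exact ⟨a, List.mem_cons_self, hna, by simpa [hstep, hmin] using h⟩
      · left
        have hstep : ffcStep cs m0 a = m0 := by unfold ffcStep; rw [if_neg hna]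
        simpa [hstep] using h
    · right
      exact ⟨e, List.mem_cons_of_mem _ he, hne, by simpa using heq⟩

-- If some element of L is a prefix of cs.drop i, then A's fold result is ≤ i.
theorem ffc_fold_le_of_match (cs : List Char) (L : List String) (m0 : Int) (i : Nat)
    (e : String) (he : e ∈ L) (hp : e.toList <+: cs.drop i) :
    L.foldl (ffcStep cs) m0 ≤ (i : Int) := by
  have hinf : e.toList <:+: cs :=
    (PySem.Chars.isIn_iff_infix _ _).mp
      ((PySem.Chars.exists_prefix_drop_iff_isIn _ _).mp ⟨i, hp⟩)
  have hnn : 0 ≤ PySem.Chars.find cs e.toList :=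
    (PySem.Chars.find_nonneg_iff _ _).mpr hinf
  have hne : PySem.Chars.find cs e.toList ≠ -1 := by omega
  have hspec := PySem.Chars.find_spec hnn
  have hle : (PySem.Chars.find cs e.toList).toNat ≤ i := by
    by_contra hlt
    exact hspec.2 i (by omega) hp
  have := ffc_fold_le_find cs L m0 e he hne
  omega

theorem ffc_core (cs : List Char) (L : List String) :
    (if L.foldl (ffcStep cs) (cs.length : Int) = (cs.length : Int) then ""
     else
       match PySem.List.pyGet? cs (L.foldl (ffcStep cs) (cs.length : Int)) with
       | some c => String.ofList [c]
       | none => "") =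
    (match (List.range cs.length).find?
        (fun i => L.any (fun elem => PySem.Chars.startswith (cs.drop i) elem.toList)) with
     | some i =>
         match PySem.List.pyGet? cs (i : Int) with
         | some c => String.ofList [c]
         | none => ""
     | none => "") := by
  set m := L.foldl (ffcStep cs) (cs.length : Int) with hm
  set p : Nat → Bool :=
    fun i => L.any (fun elem => PySem.Chars.startswith (cs.drop i) elem.toList) with hp
  by_cases hml : m = (cs.length : Int)
  · -- no match anywhere: both sides are ""
    have hnone : (List.range cs.length).find? p = none := by
      rw [List.find?_eq_none]
      intro i hi hpi
      rcases List.any_eq_true.mp hpi with ⟨e, he, hsw⟩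
      have hpref := (PySem.Chars.startswith_iff _ _).mp hsw
      have hle := ffc_fold_le_of_match cs L (cs.length : Int) i e he hpref
      have hi' := List.mem_range.mp hi
      omega
    rw [if_pos hml, hnone]
  · -- a match exists: m is the index of the first matching position
    have hle_len : m ≤ (cs.length : Int) := ffc_fold_le_init cs L _
    rcases ffc_fold_cases cs L (cs.length : Int) with h | ⟨e, he, hne, heq⟩
    · exact absurd (hm.trans h) hml
    · have hEq : m = PySem.Chars.find cs e.toList := hm.trans heq
      have h1 : -1 ≤ PySem.Chars.find cs e.toList := PySem.Chars.neg_one_le_find _ _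
      have hnn : 0 ≤ m := by rw [hEq]; omega
      have hlt : m.toNat < cs.length := by omega
      have hspec := PySem.Chars.find_spec (hEq ▸ hnn)
      rw [← hEq] at hspec
      have hpm : p m.toNat = true := by
        exact List.any_eq_true.mpr ⟨e, he, (PySem.Chars.startswith_iff _ _).mpr hspec.1⟩
      have hmin : ∀ j < m.toNat, p j = false := by
        intro j hj
        by_contra hpj
        have hpj' : p j = true := by
          cases hpj'' : p j
          · exact absurd hpj'' hpj
          · rfl
        rcases List.any_eq_true.mp hpj' with ⟨e', he', hsw⟩
        have hpref := (PySem.Chars.startswith_iff _ _).mp hsw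
        have := ffc_fold_le_of_match cs L (cs.length : Int) j e' he' hpref
        omega
      have hsome : (List.range cs.length).find? p = some m.toNat := by
        rw [List.find?_eq_some_iff_getElem]
        refine ⟨hpm, m.toNat, by simpa using hlt, by simp, ?_⟩
        intro j hj
        simp only [List.getElem_range]
        simp [hmin j (by simpa using hj)]
      have hmcast : ((m.toNat : Nat) : Int) = m := by omega
      rw [if_neg hml, hsome]
      simp only [hmcast]

theorem find_first_char_spec : Claim_equal_find_first_char := by
  intro s char_list _
  show find_first_char s char_list = find_first_char_alt s char_list
  exact ffc_core s.toList char_list
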